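-- pv_equiv track=rewrite | github.com/JoseBlanca/franklin | biolib/src/biolib/biolib_utils.py | _calculate_divisions
-- ===== SOURCE A (Python) =====
-- def _calculate_divisions(length, splits):
--     '''It calculates the length of each new seq.
--     It returns the start and end of the new sequences. giving the coordinates
--     of the original sequence.
--     '''
--     num_fragments1 = length % splits
--     num_fragments2 = splits - num_fragments1
--     new_length2 = length // splits
--     new_length1 = new_length2 + 1
--     res = ((num_fragments1, new_length1), (num_fragments2, new_length2))
--
--     lengths = []
--     for num_fragments, length in res:
--         for i in range(num_fragments):
--             lengths.append(length)
--     # Now I calculate the start and end of each sequence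
--     r_length   = 0
--     start_ends = []
--     for i, length in enumerate(lengths):
--         if i == 0:
--             start_ends.append((0, length))
--         else:
--             start_ends.append((r_length, r_length + length))
--         r_length += length
--     return start_ends
-- ===== SOURCE B (Python) =====
-- def _calculate_divisions(length, splits):
--     '''It calculates the length of each new seq.
--     It returns the start and end of the new sequences, giving coordinates
--     in the original sequence.
--     '''
--     q, r = divmod(length, splits)
--     start_ends = []
--     for i in range(splits):
--         start = i * q + min(i, r)
--         frag_len = q + (1 if i < r else 0)
--         start_ends.append((start, start + frag_len))
--     return start_ends
-- ===== Notes on version B (the rewrite author's own statement) =====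
-- stated objective: simpler
-- what changed: Replaces A's intermediate fragment-lengths list and running-sum accumulator with a single loop computing each interval directly from its index via the closed form start = i*q + min(i, r) from divmod(length, splits).
import Mathlib
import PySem

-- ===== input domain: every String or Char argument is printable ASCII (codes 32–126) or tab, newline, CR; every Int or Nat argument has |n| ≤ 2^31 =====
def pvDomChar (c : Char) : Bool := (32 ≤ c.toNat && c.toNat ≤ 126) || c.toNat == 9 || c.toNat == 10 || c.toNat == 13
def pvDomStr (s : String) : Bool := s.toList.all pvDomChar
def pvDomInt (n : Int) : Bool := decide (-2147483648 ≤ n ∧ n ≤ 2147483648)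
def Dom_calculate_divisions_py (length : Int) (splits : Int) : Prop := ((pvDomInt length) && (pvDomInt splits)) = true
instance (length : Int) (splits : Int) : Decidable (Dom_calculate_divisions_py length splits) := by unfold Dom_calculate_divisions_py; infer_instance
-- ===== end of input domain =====

-- B replaces A's intermediate fragment-lengths list and running-sum accumulator with one
-- loop computing each interval in closed form from its index (objective: simpler).

-- ===== PORT A =====
def calculate_divisions_py (length : Int) (splits : Int) : List (Int × Int) :=
  let num_fragments1 := PySem.Int.mod length splits
  let num_fragments2 := splits - num_fragments1
  let new_length2 := PySem.Int.floordiv length splits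
  let new_length1 := new_length2 + 1
  let res := [(num_fragments1, new_length1), (num_fragments2, new_length2)]
  let lengths := res.foldl (fun acc p =>
    (PySem.List.pyRange 0 p.1 1).foldl (fun acc2 _ => acc2 ++ [p.2]) acc) []
  let st := (PySem.List.enumerate lengths 0).foldl
    (fun (s : Int × List (Int × Int)) p =>
      if p.1 = 0 then (s.1 + p.2, s.2 ++ [((0 : Int), p.2)])
      else (s.1 + p.2, s.2 ++ [(s.1, s.1 + p.2)])) (0, [])
  st.2

-- ===== PORT B =====
def calculate_divisions_py_alt (length : Int) (splits : Int) : List (Int × Int) :=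
  let q := PySem.Int.floordiv length splits
  let r := PySem.Int.mod length splits
  (PySem.List.pyRange 0 splits 1).foldl (fun acc i =>
    let start := i * q + min i r
    let frag_len := q + (if i < r then 1 else 0)
    acc ++ [(start, start + frag_len)]) []

-- ===== PRECONDITION & SPEC =====
-- Pre_ excludes splits = 0, where Python A raises ZeroDivisionError.
def Pre_calculate_divisions_py (length : Int) (splits : Int) : Prop := splits ≠ 0
instance (length : Int) (splits : Int) : Decidable (Pre_calculate_divisions_py length splits) := by unfold Pre_calculate_divisions_py; infer_instance
def pvWitness_calculate_divisions_py : Int × Int := (10, 3)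
def Spec_calculate_divisions_py (length : Int) (splits : Int) (out : List (Int × Int)) : Prop := out = calculate_divisions_py_alt length splits
instance (length : Int) (splits : Int) (out : List (Int × Int)) : Decidable (Spec_calculate_divisions_py length splits out) := by unfold Spec_calculate_divisions_py; infer_instance

-- ===== CLAIM (what is proved, stated in full; the proofs are below) =====
def Claim_equal_calculate_divisions_py : Prop := ∀ (length : Int) (splits : Int), Dom_calculate_divisions_py length splits → Pre_calculate_divisions_py length splits → Spec_calculate_divisions_py length splits (calculate_divisions_py length splits)

-- ===== LEMMAS AND PROOFS =====

-- A's second loop, as a structural recursion: intervals of the fragment lengths `ls`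
-- starting at running coordinate `s`.
def pvGo2 (s : Int) : List Int → List (Int × Int)
  | [] => []
  | x :: xs => (s, s + x) :: pvGo2 (s + x) xs

theorem pvGo2_append (l1 l2 : List Int) (s : Int) :
    pvGo2 s (l1 ++ l2) = pvGo2 s l1 ++ pvGo2 (s + l1.sum) l2 := by
  induction l1 generalizing s with
  | nil => simp [pvGo2]
  | cons x xs ih => simp [pvGo2, ih, add_assoc]

theorem pvGo2_replicate (a : Nat) (x s : Int) :
    pvGo2 s (List.replicate a x) =
      (List.range a).map (fun j : Nat => (s + (j : Int) * x, s + ((j : Int) + 1) * x)) := by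
  induction a generalizing s with
  | zero => simp [pvGo2]
  | succ a ih =>
    rw [List.replicate_succ, List.range_succ_eq_map, List.map_cons, List.map_map]
    simp only [pvGo2, ih]
    refine List.cons_eq_cons.mpr ⟨?_, ?_⟩
    · simp
    · apply List.map_congr_left
      intro j _
      simp only [Function.comp_def, Prod.ext_iff]
      push_cast
      constructor <;> ring

-- the enumerate fold of A equals pvGo2, once past index 0
theorem pvFold_aux (ls : List Int) (k s : Int) (acc : List (Int × Int)) (hk : 0 < k) :
    ((PySem.List.enumerate ls k).foldl
      (fun (st : Int × List (Int × Int)) p =>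
        if p.1 = 0 then (st.1 + p.2, st.2 ++ [((0 : Int), p.2)])
        else (st.1 + p.2, st.2 ++ [(st.1, st.1 + p.2)])) (s, acc)).2
      = acc ++ pvGo2 s ls := by
  induction ls generalizing k s acc with
  | nil => simp [PySem.List.enumerate_nil, pvGo2]
  | cons x xs ih =>
    rw [PySem.List.enumerate_cons]
    simp only [List.foldl_cons, if_neg (by omega : ¬ k = 0)]
    rw [ih (k + 1) (s + x) _ (by omega)]
    simp [pvGo2]

theorem pvFold_eq_go2 (ls : List Int) :
    ((PySem.List.enumerate ls 0).foldl
      (fun (st : Int × List (Int × Int)) p =>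
        if p.1 = 0 then (st.1 + p.2, st.2 ++ [((0 : Int), p.2)])
        else (st.1 + p.2, st.2 ++ [(st.1, st.1 + p.2)])) (0, [])).2
      = pvGo2 0 ls := by
  cases ls with
  | nil => simp [PySem.List.enumerate_nil, pvGo2]
  | cons x xs =>
    rw [PySem.List.enumerate_cons]
    simp only [List.foldl_cons, if_true, zero_add]
    rw [pvFold_aux xs 1 x ([] ++ [((0 : Int), x)]) (by omega)]
    simp [pvGo2]

-- ===== VERDICT (by name: the statement is the Claim_ definition above) =====
theorem calculate_divisions_py_spec : Claim_equal_calculate_divisions_py := by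
  intro length splits _ hpre
  unfold Pre_calculate_divisions_py at hpre
  unfold Spec_calculate_divisions_py calculate_divisions_py calculate_divisions_py_alt
  set q := PySem.Int.floordiv length splits with hq
  set r := PySem.Int.mod length splits with hr
  dsimp only
  rcases lt_or_gt_of_ne hpre with hneg | hpos
  · -- splits < 0: both sides are []
    have hb := PySem.Int.mod_neg_bounds length hneg
    rw [PySem.List.pyRange_one_eq_nil (by omega : (splits : Int) ≤ 0)]
    simp only [List.foldl_cons, List.foldl_nil]
    rw [PySem.List.pyRange_one_eq_nil (by omega : (r : Int) ≤ 0),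
        PySem.List.pyRange_one_eq_nil (by omega : splits - r ≤ 0)]
    simp [PySem.List.enumerate_nil]
  · -- splits > 0
    have hr0 : 0 ≤ r := PySem.Int.mod_nonneg length hpos
    have hrlt : r < splits := PySem.Int.mod_lt length hpos
    simp only [List.foldl_cons, List.foldl_nil,
      PySem.List.foldl_append_singleton_eq_map, List.nil_append]
    rw [pvFold_eq_go2]
    rw [PySem.List.pyRange_one 0 r, PySem.List.pyRange_one 0 (splits - r),
        PySem.List.pyRange_one 0 splits]
    simp only [List.map_map, Function.comp_def, zero_add, sub_zero, List.map_const',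
      List.length_range]
    rw [pvGo2_append, pvGo2_replicate, pvGo2_replicate]
    simp only [List.sum_replicate, nsmul_eq_mul, zero_add]
    have hsplit : splits.toNat = r.toNat + (splits - r).toNat := by omega
    rw [hsplit, List.range_add, List.map_append, List.map_map]
    refine congrArg₂ (· ++ ·) ?_ ?_
    · apply List.map_congr_left
      intro j hj
      simp only [List.mem_range] at hj
      have hjr : (j : Int) < r := by omega
      simp only [min_eq_left (le_of_lt hjr), if_pos hjr, Prod.ext_iff]
      constructor <;> ring
    · apply List.map_congr_left
      intro j hj
      have hge : r ≤ (r.toNat : Int) + (j : Int) := by omega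
      simp only [Function.comp_def, Prod.ext_iff]
      push_cast
      rw [min_eq_right hge, if_neg (by omega : ¬ (r.toNat : Int) + (j : Int) < r)]
      have hcast : (r.toNat : Int) = r := by omega
      rw [hcast]
      constructor <;> ring
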